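-- pv_equiv track=rewrite | github.com/VinySY/Library-Management-System | library_logic.py | calculate_fine
-- ===== SOURCE A (Python) =====
-- def calculate_fine(days_overdue):
--     # No fine if returned on time or early
--     if days_overdue <= 0:
--         return 0
--
--     # We need to figure out which week the student is in
--     weeks = (days_overdue // 7) + 1
--     rate = 10
--     total = 0
--
--     # The fine jumps: 10/day, then 20/day, then 60/day...
--     multiplier = 1
--     for w in range(1, weeks + 1):
--         multiplier *= w
--         week_rate = rate * multiplier
--
--         # Check how many days are in the current week vs total days left
--         days_in_week = min(7, days_overdue - (w-1)*7)
--         total += days_in_week * week_rate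
--
--         if (w * 7) >= days_overdue:
--             break
--
--     return total
-- ===== SOURCE B (Python) =====
-- def calculate_fine(days_overdue):
--     # Per-day traversal: bump the week counter and running factorial
--     # multiplier at each 7-day boundary, add the day's fine as we go.
--     if days_overdue <= 0:
--         return 0
--     total = 0
--     week = 0
--     multiplier = 1
--     for day in range(1, days_overdue + 1):
--         if (day - 1) % 7 == 0:
--             week += 1
--             multiplier *= week
--         total += 10 * multiplier
--     return total
-- ===== Notes on version B (the rewrite author's own statement) =====
-- stated objective: alternative
-- what changed: B replaces A's per-week loop (with min(7,...) partial-week arithmetic and a break) by a single per-day loop that bumps a week counter and running factorial multiplier at each 7-day boundary.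
import Mathlib
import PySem

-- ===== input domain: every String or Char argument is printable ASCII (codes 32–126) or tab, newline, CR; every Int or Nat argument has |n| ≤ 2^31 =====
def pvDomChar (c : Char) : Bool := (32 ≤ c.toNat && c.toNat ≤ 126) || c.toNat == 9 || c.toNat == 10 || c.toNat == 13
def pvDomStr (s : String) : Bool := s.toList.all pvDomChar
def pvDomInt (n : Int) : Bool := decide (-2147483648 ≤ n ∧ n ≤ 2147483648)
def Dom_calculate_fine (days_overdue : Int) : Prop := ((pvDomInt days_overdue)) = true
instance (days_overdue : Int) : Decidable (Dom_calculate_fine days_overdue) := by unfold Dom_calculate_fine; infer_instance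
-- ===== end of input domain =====

-- B changes only the decomposition (per-day loop with a running factorial instead of
-- A's per-week loop with partial-week min/break arithmetic); same values, similar cost.

-- ===== PORT A =====
-- A's for-loop over w = 1..weeks with state (multiplier, total) and a conditional break.
def calcFineLoopA (d : Int) : List Int → Int → Int → Int
  | [], _, total => total
  | w :: ws, multiplier, total =>
    let multiplier := multiplier * w
    let week_rate := 10 * multiplier
    let days_in_week := min 7 (d - (w - 1) * 7)
    let total := total + days_in_week * week_rate
    if w * 7 ≥ d then total else calcFineLoopA d ws multiplier total

def calculate_fine (days_overdue : Int) : Int :=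
  if days_overdue ≤ 0 then 0
  else
    let weeks := PySem.Int.floordiv days_overdue 7 + 1
    calcFineLoopA days_overdue (PySem.List.pyRange 1 (weeks + 1) 1) 1 0

-- ===== PORT B =====
-- B's for-loop over day = 1..days_overdue with state (week, multiplier, total).
def calcFineLoopB : List Int → Int → Int → Int → Int
  | [], _, _, total => total
  | day :: ds, week, multiplier, total =>
    -- the two assignments week += 1; multiplier *= week are inlined into the call
    if PySem.Int.mod (day - 1) 7 = 0 then
      calcFineLoopB ds (week + 1) (multiplier * (week + 1))
        (total + 10 * (multiplier * (week + 1)))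
    else
      calcFineLoopB ds week multiplier (total + 10 * multiplier)

def calculate_fine_alt (days_overdue : Int) : Int :=
  if days_overdue ≤ 0 then 0
  else calcFineLoopB (PySem.List.pyRange 1 (days_overdue + 1) 1) 0 1 0

-- ===== PRECONDITION & SPEC =====
def Spec_calculate_fine (days_overdue : Int) (out : Int) : Prop := out = calculate_fine_alt days_overdue
instance (days_overdue : Int) (out : Int) : Decidable (Spec_calculate_fine days_overdue out) := by unfold Spec_calculate_fine; infer_instance

-- ===== CLAIM (what is proved, stated in full; the proofs are below) =====
def Claim_equal_calculate_fine : Prop := ∀ (days_overdue : Int), Dom_calculate_fine days_overdue → Spec_calculate_fine days_overdue (calculate_fine days_overdue)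

-- ===== LEMMAS AND PROOFS =====

-- Common reference value: fine accumulated over k days starting after `off` elapsed days.
def fineSum (off k : Nat) : Int :=
  match k with
  | 0 => 0
  | Nat.succ k => 10 * (Nat.factorial (off / 7 + 1) : Int) + fineSum (off + 1) k

theorem fineSum_add (a : Nat) : ∀ (off b : Nat),
    fineSum off (a + b) = fineSum off a + fineSum (off + a) b := by
  induction a with
  | zero => intro off b; simp [fineSum]
  | succ a ih =>
    intro off b
    have : a + 1 + b = (a + b) + 1 := by omega
    simp only [fineSum, Nat.succ_add]
    rw [ih (off + 1) b, show off + 1 + a = off + (a + 1) from by omega]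
    ring

-- Within one week block the daily rate is constant: k days at rate 10·(a+1)!.
theorem fineSum_const (k : Nat) : ∀ (a i : Nat), i + k ≤ 7 →
    fineSum (7 * a + i) k = (k : Int) * (10 * (Nat.factorial (a + 1) : Int)) := by
  induction k with
  | zero => intro a i _; simp [fineSum]
  | succ k ih =>
    intro a i h
    have hdiv : (7 * a + i) / 7 = a := by omega
    have hstep : 7 * a + i + 1 = 7 * a + (i + 1) := by omega
    rw [fineSum, hdiv, hstep, ih a (i + 1) (by omega)]
    push_cast
    ring

theorem calcFineLoopB_eq (k : Nat) : ∀ (off : Nat) (week multiplier total : Int),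
    (if off % 7 = 0 then week = (off / 7 : Nat) ∧ multiplier = (Nat.factorial (off / 7) : Int)
     else week = (off / 7 : Nat) + 1 ∧ multiplier = (Nat.factorial (off / 7 + 1) : Int)) →
    calcFineLoopB (PySem.List.pyRange ((off : Int) + 1) ((off : Int) + 1 + k) 1) week multiplier total
      = total + fineSum off k := by
  induction k with
  | zero =>
    intro off week multiplier total _
    rw [PySem.List.pyRange_one_eq_nil (by push_cast; omega)]
    simp [calcFineLoopB, fineSum]
  | succ k ih =>
    intro off week multiplier total hinv
    rw [PySem.List.pyRange_one_cons (by push_cast; omega)]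
    have hmod : PySem.Int.mod ((off : Int) + 1 - 1) 7 = ((off % 7 : Nat) : Int) := by
      simpa using PySem.Int.mod_natCast off 7
    have hnext : (off : Int) + 1 + 1 = ((off + 1 : Nat) : Int) + 1 := by push_cast; ring
    have hlen : (off : Int) + 1 + (k + 1 : Nat) = ((off + 1 : Nat) : Int) + 1 + (k : Nat) := by
      push_cast; ring
    by_cases h0 : off % 7 = 0
    · simp only [h0, if_pos] at hinv
      obtain ⟨hw, hm⟩ := hinv
      have : PySem.Int.mod ((off : Int) + 1 - 1) 7 = 0 := by rw [hmod, h0]; simp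
      rw [calcFineLoopB, if_pos this, hnext, hlen, ih (off + 1) _ _ _ ?_]
      · rw [fineSum]
        have hm' : multiplier * (week + 1) = (Nat.factorial (off / 7 + 1) : Int) := by
          rw [hm, hw, Nat.factorial_succ]; push_cast; ring
        rw [hm']; ring
      · have h1 : (off + 1) % 7 ≠ 0 := by omega
        have h2 : (off + 1) / 7 = off / 7 := by omega
        rw [if_neg h1, h2]
        constructor
        · rw [hw]
        · rw [hm, hw, Nat.factorial_succ]; push_cast; ring
    · simp only [h0, if_false] at hinv
      obtain ⟨hw, hm⟩ := hinv
      have : ¬ PySem.Int.mod ((off : Int) + 1 - 1) 7 = 0 := by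
        rw [hmod]; exact_mod_cast h0
      rw [calcFineLoopB, if_neg this, hnext, hlen, ih (off + 1) _ _ _ ?_]
      · rw [fineSum, hm]; ring
      · by_cases h1 : (off + 1) % 7 = 0
        · have h2 : (off + 1) / 7 = off / 7 + 1 := by omega
          rw [if_pos h1, h2]
          exact ⟨by rw [hw]; push_cast; ring, by rw [hm]⟩
        · have h2 : (off + 1) / 7 = off / 7 := by omega
          rw [if_neg h1, h2]
          exact ⟨hw, hm⟩

theorem calcFineLoopA_eq (f : Nat) : ∀ (n a : Nat) (total : Int), 7 * a < n → n ≤ 7 * (a + f) →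
    calcFineLoopA (n : Int) (PySem.List.pyRange ((a : Int) + 1) (((n / 7 : Nat) : Int) + 1 + 1) 1)
        (Nat.factorial a : Int) total
      = total + fineSum (7 * a) (n - 7 * a) := by
  induction f with
  | zero => intro n a total h1 h2; omega
  | succ f ih =>
    intro n a total h1 h2
    have hcons : (a : Int) + 1 < ((n / 7 : Nat) : Int) + 1 + 1 := by
      have : a ≤ n / 7 := by omega
      push_cast; omega
    rw [PySem.List.pyRange_one_cons hcons, calcFineLoopA]
    have hmul : (Nat.factorial a : Int) * ((a : Int) + 1) = (Nat.factorial (a + 1) : Int) := by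
      rw [Nat.factorial_succ]; push_cast; ring
    have hmin : min (7:Int) ((n : Int) - ((a : Int) + 1 - 1) * 7) = ((min 7 (n - 7 * a) : Nat) : Int) := by
      push_cast; omega
    by_cases hbr : ((a : Int) + 1) * 7 ≥ (n : Int)
    · rw [if_pos hbr]
      have hle : n - 7 * a ≤ 7 := by push_cast at hbr; omega
      have : fineSum (7 * a) (n - 7 * a)
          = ((n - 7 * a : Nat) : Int) * (10 * (Nat.factorial (a + 1) : Int)) := by
        have := fineSum_const (n - 7 * a) a 0 (by omega)
        simpa using this
      rw [this, hmul, hmin]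
      have hmm : min 7 (n - 7 * a) = n - 7 * a := by omega
      rw [hmm]
    · rw [if_neg hbr]
      push_cast at hbr
      have h7 : 7 * (a + 1) < n := by omega
      have hsplit : n - 7 * a = 7 + (n - 7 * (a + 1)) := by omega
      have hnext : ((a : Int) + 1) = ((a + 1 : Nat) : Int) := by push_cast; ring
      rw [hmin, hmul, hnext, ih n (a + 1) _ h7 (by omega)]
      rw [hsplit, fineSum_add 7 (7 * a) (n - 7 * (a + 1))]
      have hc : fineSum (7 * a) 7 = (7 : Int) * (10 * (Nat.factorial (a + 1) : Int)) := by
        have := fineSum_const 7 a 0 (by omega)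
        simpa using this
      have harg : 7 * a + 7 = 7 * (a + 1) := by omega
      rw [hc, harg]
      have hmm : min 7 (7 + (n - 7 * (a + 1))) = 7 := by omega
      rw [hmm]
      push_cast; ring

-- ===== VERDICT (by name: the statement is the Claim_ definition above) =====
theorem calculate_fine_spec : Claim_equal_calculate_fine := by
  intro d _
  unfold Spec_calculate_fine calculate_fine calculate_fine_alt
  by_cases hd : d ≤ 0
  · rw [if_pos hd, if_pos hd]
  · rw [if_neg hd, if_neg hd]
    rw [not_le] at hd
    obtain ⟨n, rfl⟩ := Int.eq_ofNat_of_zero_le (le_of_lt hd)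
    have hn : 0 < n := by exact_mod_cast hd
    have hfd : PySem.Int.floordiv (n : Int) 7 = ((n / 7 : Nat) : Int) := by
      exact_mod_cast PySem.Int.floordiv_natCast n 7
    have hA := calcFineLoopA_eq n n 0 0 (by omega) (by omega)
    have hB := calcFineLoopB_eq n 0 0 1 0 (by simp [Nat.factorial])
    simp only [Nat.cast_zero, Nat.factorial_zero, Nat.cast_one,
      Nat.mul_zero, Nat.sub_zero, zero_add] at hA hB
    rw [hfd]
    show calcFineLoopA (n : Int) (PySem.List.pyRange 1 (((n / 7 : Nat) : Int) + 1 + 1) 1) 1 0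
      = calcFineLoopB (PySem.List.pyRange 1 ((n : Int) + 1) 1) 0 1 0
    rw [hA, show ((n : Int) + 1) = 1 + (n : Int) from by ring, hB]
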